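-- pv_equiv track=rewrite | github.com/linkervision/visionai-data-format | visionai_data_format/schemas/utils/validators.py | validate_vai_data_frame_intervals
-- ===== SOURCE A (Python) =====
-- from typing import Dict, List, Optional, Set, Tuple, Union
--
-- def validate_vai_data_frame_intervals(
--     root_key: str,
--     data_obj_under_vai_intervals: Dict[str, List],
--     visionai_frame_intervals: List[Tuple[int, int]],
-- ) -> Tuple[bool, str]:
--     """validate frame intervals of object/context under visionai
--
--     Parameters
--     ----------
--     root_key : str
--         visionai object key, such as `contexts` or `objects`
--     data_obj_under_vai_intervals : Dict[str, list]
--         a dictionary of object uuid with the list of interval tuple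
--     visionai_frame_intervals : list[tuple[int, int]]
--         list of interval range from current visionai frames object
--
--     Returns
--     -------
--     tuple[bool,str]
--         return a tuple of boolean status and its error message
--     """
--     for data_uuid, data_intervals in data_obj_under_vai_intervals.items():
--         for start, end in data_intervals:
--             if start > end or start < 0 or end < 0:
--                 return (
--                     False,
--                     f"{root_key} {data_uuid} frame interval(s) validate {root_key} with frames error,"
--                     f"start : {start}, end : {end}",
--                 )
--             if any(
--                 frame_interval[0] <= start <= frame_interval[1]
--                 and frame_interval[0] <= end <= frame_interval[1]
--                 for frame_interval in visionai_frame_intervals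
--             ):
--                 continue
--
--             return (
--                 False,
--                 f"{root_key} {data_uuid} frame interval(s) error,"
--                 + f" current interval {start,end} doesn't match with frames intervals {visionai_frame_intervals}",
--             )
--     return True, ""
-- ===== SOURCE B (Python) =====
-- def _bisect_right(a, x):
--     lo, hi = 0, len(a)
--     while lo < hi:
--         mid = (lo + hi) // 2
--         if a[mid] <= x:
--             lo = mid + 1
--         else:
--             hi = mid
--     return lo
--
--
-- def validate_vai_data_frame_intervals(
--     root_key,
--     data_obj_under_vai_intervals,
--     visionai_frame_intervals,
-- ):
--     # Preprocess once: frame intervals sorted by start, with prefix maxima of ends.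
--     # [s, e] fits in a single frame interval  iff  some interval with start <= s
--     # has end >= e  iff  prefmax[bisect_right(starts, s) - 1] >= e.
--     fi = sorted(visionai_frame_intervals, key=lambda p: p[0])
--     starts = [p[0] for p in fi]
--     prefmax = []
--     m = None
--     for _s, e in fi:
--         m = e if m is None else max(m, e)
--         prefmax.append(m)
--     for data_uuid, data_intervals in data_obj_under_vai_intervals.items():
--         for start, end in data_intervals:
--             if start > end or start < 0 or end < 0:
--                 return (
--                     False,
--                     f"{root_key} {data_uuid} frame interval(s) validate {root_key} with frames error,"
--                     f"start : {start}, end : {end}",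
--                 )
--             r = _bisect_right(starts, start)
--             if r > 0 and prefmax[r - 1] >= end:
--                 continue
--             return (
--                 False,
--                 f"{root_key} {data_uuid} frame interval(s) error,"
--                 + f" current interval {start,end} doesn't match with frames intervals {visionai_frame_intervals}",
--             )
--     return True, ""
-- ===== Notes on version B (the rewrite author's own statement) =====
-- stated objective: alternative
-- what changed: A rescans all visionai frame intervals for every data interval; B preprocesses the frame intervals once (sort by start, prefix maxima of ends) and answers each containment query with a binary search, O((D+F) log F) instead of O(D*F).
import Mathlib
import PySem

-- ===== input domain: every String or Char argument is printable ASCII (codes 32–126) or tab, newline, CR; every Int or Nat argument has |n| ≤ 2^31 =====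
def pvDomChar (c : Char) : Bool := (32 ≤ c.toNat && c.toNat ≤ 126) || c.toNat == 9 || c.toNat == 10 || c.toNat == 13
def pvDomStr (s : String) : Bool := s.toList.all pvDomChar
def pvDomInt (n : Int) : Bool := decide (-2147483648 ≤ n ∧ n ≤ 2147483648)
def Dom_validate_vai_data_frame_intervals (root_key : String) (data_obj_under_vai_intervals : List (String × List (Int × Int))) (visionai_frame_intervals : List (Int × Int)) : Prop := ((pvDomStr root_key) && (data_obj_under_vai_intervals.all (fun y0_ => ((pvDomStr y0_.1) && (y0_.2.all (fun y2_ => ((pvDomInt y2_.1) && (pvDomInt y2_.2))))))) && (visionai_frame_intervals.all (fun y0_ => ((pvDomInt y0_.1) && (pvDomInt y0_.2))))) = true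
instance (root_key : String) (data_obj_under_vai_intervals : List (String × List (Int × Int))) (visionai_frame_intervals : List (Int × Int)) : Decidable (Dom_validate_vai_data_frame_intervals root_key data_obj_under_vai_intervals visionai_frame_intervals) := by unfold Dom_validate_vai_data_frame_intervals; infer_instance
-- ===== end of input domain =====

-- B replaces A's inner linear scan of visionai_frame_intervals (per data interval) by a
-- one-time sort with prefix maxima of interval ends plus a per-query binary search.
-- Return-value equivalence only; neither program mutates its arguments.

-- ===== PORT A =====
-- shared message formatting (Python f-strings; used verbatim by both ports)
def pvFmtPair (p : Int × Int) : String :=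
  "(" ++ PySem.Int.toStr p.1 ++ ", " ++ PySem.Int.toStr p.2 ++ ")"
def pvFmtIntervals (l : List (Int × Int)) : String :=
  "[" ++ PySem.Str.join ", " (l.map pvFmtPair) ++ "]"
def pvMsgBad (root_key uuid : String) (s e : Int) : String :=
  root_key ++ " " ++ uuid ++ " frame interval(s) validate " ++ root_key ++
    " with frames error,start : " ++ PySem.Int.toStr s ++ ", end : " ++ PySem.Int.toStr e
def pvMsgNoMatch (root_key uuid : String) (s e : Int) (fis : List (Int × Int)) : String :=
  root_key ++ " " ++ uuid ++ " frame interval(s) error," ++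
    " current interval " ++ pvFmtPair (s, e) ++ " doesn't match with frames intervals " ++
    pvFmtIntervals fis

-- inner 'for start, end in data_intervals' loop (some = early return)
def pvAInner (root_key uuid : String) (fis : List (Int × Int)) :
    List (Int × Int) → Option (Bool × String)
  | [] => none
  | (s, e) :: rest =>
    if s > e ∨ s < 0 ∨ e < 0 then
      some (false, pvMsgBad root_key uuid s e)
    else if fis.any (fun f => (decide (f.1 ≤ s) && decide (s ≤ f.2)) &&
                              (decide (f.1 ≤ e) && decide (e ≤ f.2))) then
      pvAInner root_key uuid fis rest
    else
      some (false, pvMsgNoMatch root_key uuid s e fis)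

-- outer 'for data_uuid, data_intervals in ….items()' loop
def pvAOuter (root_key : String) (fis : List (Int × Int)) :
    List (String × List (Int × Int)) → Bool × String
  | [] => (true, "")
  | (uuid, ds) :: rest =>
    match pvAInner root_key uuid fis ds with
    | some r => r
    | none => pvAOuter root_key fis rest

def validate_vai_data_frame_intervals (root_key : String) (data_obj_under_vai_intervals : List (String × List (Int × Int))) (visionai_frame_intervals : List (Int × Int)) : Bool × String :=
  pvAOuter root_key visionai_frame_intervals data_obj_under_vai_intervals

-- ===== PORT B =====
-- _bisect_right: binary search, 'while lo < hi' loop (fuel = hi - lo bounds the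
-- number of iterations, making the recursion structural; the loop itself is unchanged)
def pvBsrLoop (a : List Int) (x : Int) : Nat → Nat → Nat → Nat
  | 0, lo, _ => lo
  | fuel + 1, lo, hi =>
    if lo < hi then
      let mid := (lo + hi) / 2
      if a.getD mid 0 ≤ x then pvBsrLoop a x fuel (mid + 1) hi else pvBsrLoop a x fuel lo mid
    else lo

def pvBsr (a : List Int) (x : Int) (lo hi : Nat) : Nat :=
  pvBsrLoop a x (hi - lo) lo hi

-- one step of the prefix-maximum loop ('m = e if m is None else max(m, e); prefmax.append(m)')
def pvScanStep (st : Option Int × List Int) (p : Int × Int) : Option Int × List Int :=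
  let m := match st.1 with
    | none => p.2
    | some m0 => max m0 p.2
  (some m, st.2 ++ [m])

-- 'r = _bisect_right(starts, start); r > 0 and prefmax[r-1] >= end'
def pvBContains (starts prefmax : List Int) (s e : Int) : Bool :=
  let r := pvBsr starts s 0 starts.length
  decide (0 < r) && decide (e ≤ prefmax.getD (r - 1) 0)

def pvBInner (root_key uuid : String) (fis : List (Int × Int)) (starts prefmax : List Int) :
    List (Int × Int) → Option (Bool × String)
  | [] => none
  | (s, e) :: rest =>
    if s > e ∨ s < 0 ∨ e < 0 then
      some (false, pvMsgBad root_key uuid s e)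
    else if pvBContains starts prefmax s e then
      pvBInner root_key uuid fis starts prefmax rest
    else
      some (false, pvMsgNoMatch root_key uuid s e fis)

def pvBOuter (root_key : String) (fis : List (Int × Int)) (starts prefmax : List Int) :
    List (String × List (Int × Int)) → Bool × String
  | [] => (true, "")
  | (uuid, ds) :: rest =>
    match pvBInner root_key uuid fis starts prefmax ds with
    | some r => r
    | none => pvBOuter root_key fis starts prefmax rest

def validate_vai_data_frame_intervals_alt (root_key : String) (data_obj_under_vai_intervals : List (String × List (Int × Int))) (visionai_frame_intervals : List (Int × Int)) : Bool × String :=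
  let fi := PySem.List.sorted visionai_frame_intervals (fun p => p.1) false
  let starts := fi.map (fun p => p.1)
  let prefmax := (fi.foldl pvScanStep (none, [])).2
  pvBOuter root_key visionai_frame_intervals starts prefmax data_obj_under_vai_intervals

-- ===== PRECONDITION & SPEC =====
def Spec_validate_vai_data_frame_intervals (root_key : String) (data_obj_under_vai_intervals : List (String × List (Int × Int))) (visionai_frame_intervals : List (Int × Int)) (out : Bool × String) : Prop := out = validate_vai_data_frame_intervals_alt root_key data_obj_under_vai_intervals visionai_frame_intervals
instance (root_key : String) (data_obj_under_vai_intervals : List (String × List (Int × Int))) (visionai_frame_intervals : List (Int × Int)) (out : Bool × String) : Decidable (Spec_validate_vai_data_frame_intervals root_key data_obj_under_vai_intervals visionai_frame_intervals out) := by unfold Spec_validate_vai_data_frame_intervals; infer_instance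

-- ===== CLAIM (what is proved, stated in full; the proofs are below) =====
def Claim_equal_validate_vai_data_frame_intervals : Prop := ∀ (root_key : String) (data_obj_under_vai_intervals : List (String × List (Int × Int))) (visionai_frame_intervals : List (Int × Int)), Dom_validate_vai_data_frame_intervals root_key data_obj_under_vai_intervals visionai_frame_intervals → Spec_validate_vai_data_frame_intervals root_key data_obj_under_vai_intervals visionai_frame_intervals (validate_vai_data_frame_intervals root_key data_obj_under_vai_intervals visionai_frame_intervals)

-- ===== LEMMAS AND PROOFS =====

-- sorted list: getD is monotone
lemma pvGetD_mono (a : List Int) (h : a.Pairwise (· ≤ ·)) {i j : Nat} (hij : i ≤ j)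
    (hj : j < a.length) : a.getD i 0 ≤ a.getD j 0 := by
  rcases eq_or_lt_of_le hij with rfl | hlt
  · exact le_refl _
  · rw [List.getD_eq_getElem a 0 (lt_trans hlt hj), List.getD_eq_getElem a 0 hj]
    exact List.pairwise_iff_getElem.mp h i j _ _ hlt

-- binary-search invariant
lemma pvBsrLoop_spec (a : List Int) (x : Int) (fuel lo hi : Nat) (hs : a.Pairwise (· ≤ ·))
    (hfuel : hi - lo ≤ fuel) (hhi : hi ≤ a.length) (hlohi : lo ≤ hi)
    (h1 : ∀ j, j < lo → a.getD j 0 ≤ x)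
    (h2 : ∀ j, hi ≤ j → j < a.length → x < a.getD j 0) :
    pvBsrLoop a x fuel lo hi ≤ hi ∧ lo ≤ pvBsrLoop a x fuel lo hi ∧
      (∀ j, j < pvBsrLoop a x fuel lo hi → a.getD j 0 ≤ x) ∧
      (∀ j, pvBsrLoop a x fuel lo hi ≤ j → j < a.length → x < a.getD j 0) := by
  induction fuel generalizing lo hi with
  | zero =>
    have hlh : lo = hi := by omega
    subst hlh
    exact ⟨le_refl _, le_refl _, h1, fun j hj hj2 => h2 j hj hj2⟩
  | succ fuel ih =>
    rw [pvBsrLoop]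
    by_cases hlt : lo < hi
    · simp only [if_pos hlt]
      by_cases hle : a.getD ((lo + hi) / 2) 0 ≤ x
      · simp only [if_pos hle]
        have hmid : (lo + hi) / 2 < hi := by omega
        have h1' : ∀ j, j < (lo + hi) / 2 + 1 → a.getD j 0 ≤ x := by
          intro j hj
          exact le_trans (pvGetD_mono a hs (by omega) (by omega)) hle
        obtain ⟨c1, c2, c3, c4⟩ := ih ((lo + hi) / 2 + 1) hi (by omega) hhi (by omega) h1' h2
        exact ⟨c1, by omega, c3, c4⟩
      · simp only [if_neg hle]
        have hmid : (lo + hi) / 2 < hi := by omega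
        have h2' : ∀ j, (lo + hi) / 2 ≤ j → j < a.length → x < a.getD j 0 := by
          intro j hj hj2
          exact lt_of_lt_of_le (by omega) (pvGetD_mono a hs hj hj2)
        obtain ⟨c1, c2, c3, c4⟩ := ih lo ((lo + hi) / 2) (by omega) (by omega) (by omega) h1 h2'
        exact ⟨by omega, c2, c3, c4⟩
    · simp only [if_neg hlt]
      exact ⟨by omega, le_refl _, h1, fun j hj hj2 => h2 j (by omega) hj2⟩

lemma pvBsr_spec (a : List Int) (x : Int) (lo hi : Nat) (hs : a.Pairwise (· ≤ ·))
    (hhi : hi ≤ a.length) (hlohi : lo ≤ hi)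
    (h1 : ∀ j, j < lo → a.getD j 0 ≤ x)
    (h2 : ∀ j, hi ≤ j → j < a.length → x < a.getD j 0) :
    pvBsr a x lo hi ≤ hi ∧ lo ≤ pvBsr a x lo hi ∧
      (∀ j, j < pvBsr a x lo hi → a.getD j 0 ≤ x) ∧
      (∀ j, pvBsr a x lo hi ≤ j → j < a.length → x < a.getD j 0) :=
  pvBsrLoop_spec a x (hi - lo) lo hi hs (le_refl _) hhi hlohi h1 h2

-- the prefix-max loop, as a structural recursion (proof helper only)
def pvScan : Option Int → List (Int × Int) → List Int
  | _, [] => []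
  | m?, p :: rest =>
    let m := match m? with
      | none => p.2
      | some m0 => max m0 p.2
    m :: pvScan (some m) rest

lemma pvFoldl_scanStep (l : List (Int × Int)) (st : Option Int × List Int) :
    l.foldl pvScanStep st = ((l.foldl pvScanStep st).1, st.2 ++ pvScan st.1 l) := by
  induction l generalizing st with
  | nil => simp [pvScan]
  | cons p rest ih =>
    simp only [List.foldl_cons]
    rw [ih (pvScanStep st p)]
    cases h : st.1 <;>
      simp [pvScanStep, pvScan, h, List.append_assoc]

lemma pvExShift (p : Int × Int) (rest : List (Int × Int)) (i : Nat) (e : Int) :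
    (∃ j, j ≤ i + 1 ∧ e ≤ ((p :: rest).getD j (0, 0)).2)
      ↔ e ≤ p.2 ∨ ∃ j, j ≤ i ∧ e ≤ (rest.getD j (0, 0)).2 := by
  constructor
  · rintro ⟨j, hj, h⟩
    cases j with
    | zero => exact Or.inl h
    | succ j => exact Or.inr ⟨j, by omega, by simpa using h⟩
  · rintro (h | ⟨j, hj, h⟩)
    · exact ⟨0, by omega, h⟩
    · exact ⟨j + 1, by omega, by simpa using h⟩

lemma pvScan_le_iff_some (m : Int) (l : List (Int × Int)) (i : Nat) (hi : i < l.length)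
    (e : Int) :
    e ≤ (pvScan (some m) l).getD i 0 ↔ e ≤ m ∨ ∃ j, j ≤ i ∧ e ≤ (l.getD j (0, 0)).2 := by
  induction l generalizing m i with
  | nil => simp at hi
  | cons p rest ih =>
    cases i with
    | zero =>
      simp only [pvScan, List.getD_cons_zero, le_max_iff, Nat.le_zero]
      constructor
      · rintro (h | h)
        · exact Or.inl h
        · exact Or.inr ⟨0, rfl, h⟩
      · rintro (h | ⟨j, rfl, h⟩)
        · exact Or.inl h
        · exact Or.inr h
    | succ i =>
      have hi' : i < rest.length := by simpa using hi
      simp only [pvScan, List.getD_cons_succ]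
      rw [ih (max m p.2) i hi', pvExShift p rest i e]
      simp only [le_max_iff]
      tauto

lemma pvScan_le_iff (l : List (Int × Int)) (i : Nat) (hi : i < l.length) (e : Int) :
    e ≤ (pvScan none l).getD i 0 ↔ ∃ j, j ≤ i ∧ e ≤ (l.getD j (0, 0)).2 := by
  cases l with
  | nil => simp at hi
  | cons p rest =>
    cases i with
    | zero =>
      simp only [pvScan, List.getD_cons_zero, Nat.le_zero]
      constructor
      · intro h; exact ⟨0, rfl, h⟩
      · rintro ⟨j, rfl, h⟩; exact h
    | succ i =>
      have hi' : i < rest.length := by simpa using hi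
      simp only [pvScan, List.getD_cons_succ]
      rw [pvScan_le_iff_some p.2 rest i hi', pvExShift p rest i e]

-- the heart: A's linear 'any' equals B's bisect + prefix-max test (for s ≤ e)
lemma pvContains_eq (vis : List (Int × Int)) (s e : Int) (hse : s ≤ e) :
    (vis.any (fun f => (decide (f.1 ≤ s) && decide (s ≤ f.2)) &&
                       (decide (f.1 ≤ e) && decide (e ≤ f.2))))
      = pvBContains ((PySem.List.sorted vis (fun p => p.1) false).map (fun p => p.1))
          ((PySem.List.sorted vis (fun p => p.1) false).foldl pvScanStep (none, [])).2 s e := by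
  set fi := PySem.List.sorted vis (fun p => p.1) false with hfi
  have hprefix : (fi.foldl pvScanStep (none, [])).2 = pvScan none fi := by
    conv_lhs => rw [pvFoldl_scanStep]
    simp
  have hs : List.Pairwise (fun a b : Int × Int => a.1 ≤ b.1) fi :=
    PySem.List.sorted_pairwise (xs := vis) (key := fun p => p.1)
  have hsp : (fi.map (fun p => p.1)).Pairwise (fun a b : Int => a ≤ b) :=
    List.pairwise_map.mpr hs
  have hlen : (fi.map (fun p => p.1)).length = fi.length := List.length_map _
  obtain ⟨hr1, -, hr3, hr4⟩ :=
    pvBsr_spec (fi.map (fun p => p.1)) s 0 (fi.map (fun p => p.1)).length hsp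
      (le_refl _) (Nat.zero_le _) (fun j hj => absurd hj (by omega))
      (fun j hj hj2 => absurd hj2 (by omega))
  rw [Bool.eq_iff_iff]
  simp only [List.any_eq_true, Bool.and_eq_true, decide_eq_true_eq, pvBContains, hprefix]
  constructor
  · rintro ⟨f, hmem, ⟨h1, h2⟩, h3, h4⟩
    have hmem' : f ∈ fi := (PySem.List.mem_sorted _ _ _ _).mpr hmem
    obtain ⟨i, hi, rfl⟩ := List.mem_iff_getElem.mp hmem'
    have hgi : (fi.map (fun p => p.1)).getD i 0 = (fi[i]).1 := by
      rw [List.getD_eq_getElem _ _ (by omega), List.getElem_map]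
    have hir : i < pvBsr (fi.map (fun p => p.1)) s 0 (fi.map (fun p => p.1)).length := by
      by_contra hnot
      have := hr4 i (by omega) (by omega)
      rw [hgi] at this
      omega
    refine ⟨by omega, ?_⟩
    rw [pvScan_le_iff fi _ (by omega) e]
    exact ⟨i, by omega, by rw [List.getD_eq_getElem _ _ (by omega)]; exact h4⟩
  · rintro ⟨hr0, hle⟩
    have hrlen : pvBsr (fi.map (fun p => p.1)) s 0 (fi.map (fun p => p.1)).length - 1
        < fi.length := by omega
    obtain ⟨j, hj, hje⟩ := (pvScan_le_iff fi _ hrlen e).mp hle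
    have hjlen : j < fi.length := by omega
    rw [List.getD_eq_getElem _ _ (by omega)] at hje
    have hjs : (fi[j]).1 ≤ s := by
      have := hr3 j (by omega)
      rw [List.getD_eq_getElem _ _ (by omega), List.getElem_map] at this
      exact this
    exact ⟨fi[j], (PySem.List.mem_sorted _ _ _ _).mp (List.getElem_mem hjlen),
      ⟨hjs, by omega⟩, by omega, hje⟩

lemma pvInner_eq (root_key uuid : String) (vis : List (Int × Int)) (ds : List (Int × Int)) :
    pvAInner root_key uuid vis ds
      = pvBInner root_key uuid vis
          ((PySem.List.sorted vis (fun p => p.1) false).map (fun p => p.1))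
          ((PySem.List.sorted vis (fun p => p.1) false).foldl pvScanStep (none, [])).2 ds := by
  induction ds with
  | nil => rfl
  | cons p rest ih =>
    obtain ⟨s, e⟩ := p
    by_cases hbad : s > e ∨ s < 0 ∨ e < 0
    · simp [pvAInner, pvBInner, hbad]
    · have hse : s ≤ e := by omega
      simp only [pvAInner, pvBInner, if_neg hbad, pvContains_eq vis s e hse, ih]

lemma pvOuter_eq (root_key : String) (vis : List (Int × Int))
    (data : List (String × List (Int × Int))) :
    pvAOuter root_key vis data
      = pvBOuter root_key vis
          ((PySem.List.sorted vis (fun p => p.1) false).map (fun p => p.1))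
          ((PySem.List.sorted vis (fun p => p.1) false).foldl pvScanStep (none, [])).2 data := by
  induction data with
  | nil => rfl
  | cons kv rest ih =>
    obtain ⟨uuid, ds⟩ := kv
    simp only [pvAOuter, pvBOuter, pvInner_eq root_key uuid vis ds, ih]

-- ===== VERDICT (by name: the statement is the Claim_ definition above) =====
theorem validate_vai_data_frame_intervals_spec : Claim_equal_validate_vai_data_frame_intervals := by
  intro root_key data vis _
  show _ = _
  unfold validate_vai_data_frame_intervals validate_vai_data_frame_intervals_alt
  exact pvOuter_eq root_key vis data
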